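-- pv_equiv track=rewrite | github.com/siefr3dus/Homemade_WAF | code/checks/bot.py | count_ips
-- ===== SOURCE A (Python) =====
-- def count_ips(logs: [[str]]) -> ([int], [int]):
--     if len(logs) == 0:
--         return [], []
--     ip = [logs[0][1]]
--     count = [0]
--     for i in logs:
--         for k in range(len(ip)):
--             if i[1] == ip[k]:
--                 count[k] += 1
--                 break
--             if k == len(ip)-1:
--                 ip.append(i[1])
--                 count.append(1)
--     return ip, count
-- ===== SOURCE B (Python) =====
-- def count_ips(logs):
--     ips = [e[1] for e in logs]
--     order = list(dict.fromkeys(ips))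
--     counts = {}
--     for x in ips:
--         counts[x] = counts.get(x, 0) + 1
--     return order, [counts[ip] for ip in order]
-- ===== Notes on version B (the rewrite author's own statement) =====
-- stated objective: simpler
-- what changed: B separates ordering from counting: it extracts the second column once, builds the first-appearance order with dict.fromkeys and the counts with a single dict-aggregation pass, replacing A's interleaved growth of two parallel lists with an inner linear membership scan per log entry.
import Mathlib
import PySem

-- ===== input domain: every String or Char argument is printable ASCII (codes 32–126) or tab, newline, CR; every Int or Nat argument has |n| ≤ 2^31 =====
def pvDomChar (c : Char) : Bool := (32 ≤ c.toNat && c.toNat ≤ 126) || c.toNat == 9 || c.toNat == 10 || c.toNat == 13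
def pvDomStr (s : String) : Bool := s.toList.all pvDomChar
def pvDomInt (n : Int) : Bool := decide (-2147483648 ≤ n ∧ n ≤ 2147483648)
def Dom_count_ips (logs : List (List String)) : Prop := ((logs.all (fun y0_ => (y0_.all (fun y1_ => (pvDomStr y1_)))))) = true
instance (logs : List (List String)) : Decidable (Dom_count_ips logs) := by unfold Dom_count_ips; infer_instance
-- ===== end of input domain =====

-- B separates ordering from counting (dict.fromkeys order + one counting-dict pass) instead of A's
-- interleaved parallel-list growth with an inner per-entry membership scan; return values proved equal on Pre_.


-- ===== PORT A =====
-- A's inner 'for k in range(len(ip))' loop, with its break and append-at-last-index behaviour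
def pvInner (x : String) (ip : List String) (cnt : List Int) (n k : Nat) : List String × List Int :=
  if k < n then
    if PySem.List.pyGetD ip (k : Int) "" == x then
      (ip, PySem.List.pySetD cnt (k : Int) (PySem.List.pyGetD cnt (k : Int) 0 + 1))
    else if k == ip.length - 1 then
      pvInner x (ip ++ [x]) (cnt ++ [1]) n (k + 1)
    else
      pvInner x ip cnt n (k + 1)
  else (ip, cnt)
termination_by n - k

def count_ips (logs : List (List String)) : List String × List Int :=
  match logs with
  | [] => ([], [])
  | first :: _ =>
    logs.foldl
      (fun st row => pvInner (PySem.List.pyGetD row 1 "") st.1 st.2 st.1.length 0)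
      ([PySem.List.pyGetD first 1 ""], [0])

-- ===== PORT B =====
def count_ips_alt (logs : List (List String)) : List String × List Int :=
  let ips := logs.map (fun e => PySem.List.pyGetD e 1 "")
  let order := PySem.List.dedup ips
  let counts := ips.foldl (fun d x => d.insert x (d.getD x 0 + 1))
                  (PySem.Dict.empty : PySem.Dict String Int)
  (order, order.map (fun ip => counts.getD ip 0))

-- ===== PRECONDITION & SPEC =====
-- Pre_ excludes exactly the inputs containing a row shorter than 2 entries, on which Python A
-- raises IndexError at i[1] (B raises there too).
def Pre_count_ips (logs : List (List String)) : Prop := ∀ row ∈ logs, 2 ≤ row.length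
instance (logs : List (List String)) : Decidable (Pre_count_ips logs) := by unfold Pre_count_ips; infer_instance
def pvWitness_count_ips : List (List String) := [["a", "1.2.3.4"], ["b", "1.2.3.4"], ["c", "5.6.7.8"]]

def Spec_count_ips (logs : List (List String)) (out : List String × List Int) : Prop := out = count_ips_alt logs
instance (logs : List (List String)) (out : List String × List Int) : Decidable (Spec_count_ips logs out) := by unfold Spec_count_ips; infer_instance

-- ===== CLAIM (what is proved, stated in full; the proofs are below) =====
def Claim_equal_count_ips : Prop := ∀ (logs : List (List String)), Dom_count_ips logs → Pre_count_ips logs → Spec_count_ips logs (count_ips logs)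

-- ===== LEMMAS AND PROOFS =====

-- the per-IP occurrence count over the processed prefix, carried by the loop invariant
def pvF (pre : List String) : String → Int := fun y => (pre.count y : Int)

theorem pvF_append (pre : List String) (x y : String) :
    pvF (pre ++ [x]) y = if y = x then pvF pre y + 1 else pvF pre y := by
  by_cases hyx : y = x
  · subst hyx; simp [pvF, List.count_append]
  · simp [pvF, List.count_append, hyx, Ne.symm hyx]

theorem pvF_append_ne (pre : List String) (x y : String) (h : y ≠ x) :
    pvF (pre ++ [x]) y = pvF pre y := by rw [pvF_append, if_neg h]

theorem pvF_append_self (pre : List String) (x : String) (h : x ∉ pre) :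
    pvF (pre ++ [x]) x = 1 := by
  rw [pvF_append, if_pos rfl]
  simp [pvF, List.count_eq_zero_of_not_mem h]

-- A's inner loop either bumps the count at the (unique) index of x, or appends x with count 1
theorem pvInner_eval (x : String) (ip : List String) (f : String → Int)
    (hnd : ip.Nodup) :
    ∀ m k, ip.length - k = m → k < ip.length → (∀ j, (hj : j < ip.length) → j < k → ip[j] ≠ x) →
    pvInner x ip (ip.map f) ip.length k =
      if x ∈ ip then (ip, ip.map (fun y => if y = x then f y + 1 else f y))
      else (ip ++ [x], ip.map f ++ [1]) := by
  intro m
  induction m with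
  | zero => intro k hm hk hpre; omega
  | succ m ih =>
    intro k hm hk hpre
    rw [pvInner, if_pos hk]
    have hgd : PySem.List.pyGetD ip (k : Int) "" = ip[k] := by
      simp [PySem.List.pyGetD_natCast, List.getD_eq_getElem?_getD, List.getElem?_eq_getElem hk]
    by_cases hbeq : ip[k] = x
    · have hx : x ∈ ip := hbeq ▸ List.getElem_mem hk
      rw [if_pos, if_pos hx]
      · refine Prod.ext rfl ?_
        simp only [PySem.List.pySetD_natCast, PySem.List.pyGetD_natCast]
        have hlen : k < (ip.map f).length := by simpa using hk
        have hgd2 : (ip.map f).getD k 0 = f ip[k] := by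
          simp [List.getD_eq_getElem?_getD, List.getElem?_eq_getElem hlen,
            List.getElem_map]
        rw [hgd2]
        apply List.ext_getElem
        · simp
        · intro j hj1 hj2
          rcases eq_or_ne j k with rfl | hjk
          · simp [hbeq]
          · have hjlen : j < ip.length := by simpa using hj2
            have : ip[j] ≠ x := by
              intro hcontra
              exact hjk (List.Nodup.getElem_inj_iff hnd |>.mp (hcontra.trans hbeq.symm))
            simp [Ne.symm hjk, List.getElem_map, this]
      · rw [hgd]; exact beq_iff_eq.mpr hbeq
    · rw [if_neg (by rw [hgd]; simpa using hbeq)]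
      by_cases hlast : k = ip.length - 1
      · have hxni : x ∉ ip := by
          intro hx
          obtain ⟨j, hj, hje⟩ := List.getElem_of_mem hx
          rcases Nat.lt_or_ge j k with h | h
          · exact hpre j hj h hje
          · have : j = k := by omega
            exact hbeq (this ▸ hje)
        rw [if_pos (by simpa using hlast), if_neg hxni]
        rw [pvInner, if_neg (by omega)]
      · rw [if_neg (by simpa using hlast)]
        have := ih (k + 1) (by omega) (by omega) ?_
        · exact this
        · intro j hj hjk
          rcases Nat.lt_or_ge j k with h | h
          · exact hpre j hj h
          · have : j = k := by omega
            exact this ▸ hbeq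

theorem pv_dedup_append (l : List String) (x : String) :
    PySem.List.dedup (l ++ [x]) =
      if x ∈ PySem.List.dedup l then PySem.List.dedup l else PySem.List.dedup l ++ [x] := by
  simp only [PySem.List.dedup, PySem.Set.ofList, List.foldl_append, List.foldl_cons, List.foldl_nil]
  by_cases h : x ∈ List.foldl PySem.Set.add PySem.Set.empty l
  · rw [if_pos h, PySem.Set.add_of_mem h]
  · rw [if_neg h, PySem.Set.add_of_not_mem h]

theorem pv_dedup_cons_cons (x : String) (l : List String) :
    PySem.List.dedup (x :: x :: l) = PySem.List.dedup (x :: l) := by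
  simp only [PySem.List.dedup, PySem.Set.ofList, List.foldl_cons]
  rw [PySem.Set.add_of_mem (by
    rw [PySem.Set.add_of_not_mem (by simp [PySem.Set.empty])]
    simp [PySem.Set.empty])]

theorem pv_step_inv (x0 : String) (pre : List String) (x : String) :
    pvInner x (PySem.List.dedup (x0 :: pre))
      ((PySem.List.dedup (x0 :: pre)).map (pvF pre))
      (PySem.List.dedup (x0 :: pre)).length 0
    = (PySem.List.dedup (x0 :: (pre ++ [x])),
       (PySem.List.dedup (x0 :: (pre ++ [x]))).map (pvF (pre ++ [x]))) := by
  set ip := PySem.List.dedup (x0 :: pre) with hip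
  have hx0 : x0 ∈ ip := (PySem.List.mem_dedup _ _).mpr (List.mem_cons_self)
  have hpos : 0 < ip.length := List.length_pos_of_mem hx0
  have hnd : ip.Nodup := PySem.List.nodup_dedup _
  have hda : PySem.List.dedup (x0 :: (pre ++ [x]))
      = if x ∈ ip then ip else ip ++ [x] := by
    rw [show x0 :: (pre ++ [x]) = (x0 :: pre) ++ [x] by simp, pv_dedup_append]
  rw [pvInner_eval x ip (pvF pre) hnd ip.length 0 (by omega) hpos (by omega)]
  by_cases hx : x ∈ ip
  · rw [if_pos hx, hda, if_pos hx]
    refine Prod.ext rfl ?_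
    apply List.map_congr_left
    intro y _
    rw [pvF_append]
  · rw [if_neg hx, hda, if_neg hx]
    have hxl : x ∉ x0 :: pre := fun h => hx ((PySem.List.mem_dedup _ _).mpr h)
    have h2 : List.map (pvF (pre ++ [x])) (ip ++ [x]) = List.map (pvF pre) ip ++ [1] := by
      rw [List.map_append]
      congr 1
      · exact List.map_congr_left (fun y hy => pvF_append_ne pre x y (fun he => hx (he ▸ hy)))
      · simp only [List.map_cons, List.map_nil]
        rw [pvF_append_self pre x (fun h => hxl (List.mem_cons_of_mem _ h))]
    rw [h2]

theorem pv_fold_inv (x0 : String) : ∀ (l pre : List String),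
    List.foldl (fun (st : List String × List Int) x => pvInner x st.1 st.2 st.1.length 0)
      (PySem.List.dedup (x0 :: pre), (PySem.List.dedup (x0 :: pre)).map (pvF pre)) l
    = (PySem.List.dedup (x0 :: (pre ++ l)),
       (PySem.List.dedup (x0 :: (pre ++ l))).map (pvF (pre ++ l))) := by
  intro l
  induction l with
  | nil => intro pre; simp
  | cons x l ih =>
    intro pre
    rw [List.foldl_cons]
    have hs := pv_step_inv x0 pre x
    simp only [] at hs ⊢
    rw [hs, ih (pre ++ [x])]
    simp

theorem pv_main (logs : List (List String)) : count_ips logs = count_ips_alt logs := by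
  match logs with
  | [] => rfl
  | r :: rs =>
    rw [count_ips, count_ips_alt]
    set s : List String → String := fun e => PySem.List.pyGetD e 1 "" with hs
    have hmap : (r :: rs).foldl
        (fun (st : List String × List Int) row => pvInner (s row) st.1 st.2 st.1.length 0)
        ([s r], [0])
      = ((r :: rs).map s).foldl
          (fun (st : List String × List Int) x => pvInner x st.1 st.2 st.1.length 0)
          ([s r], [0]) :=
      (List.foldl_map (f := s)
        (g := fun (st : List String × List Int) x => pvInner x st.1 st.2 st.1.length 0)
        (l := r :: rs) (init := ([s r], [0]))).symm
    have hinit : (([s r], [0]) : List String × List Int)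
        = (PySem.List.dedup (s r :: []), (PySem.List.dedup (s r :: [])).map (pvF [])) := by
      have h1 : PySem.List.dedup [s r] = [s r] := rfl
      rw [h1]
      simp [pvF]
    rw [hmap, hinit, List.map_cons]
    rw [pv_fold_inv (s r) (s r :: rs.map s) []]
    simp only [List.nil_append]
    rw [pv_dedup_cons_cons]
    refine Prod.ext rfl ?_
    apply List.map_congr_left
    intro y _
    rw [PySem.Dict.getD_foldl_insert_add_one, PySem.Dict.getD_empty]
    simp [pvF]

-- ===== VERDICT (by name: the statement is the Claim_ definition above) =====
theorem count_ips_spec : Claim_equal_count_ips := by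
  intro logs _ _
  exact pv_main logs
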